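-- pv_equiv track=rewrite | github.com/jwohlin2/CAD_Quoting_Tool | cad_quoter/geo_dump.py | _ordered_totals_map
-- ===== SOURCE A (Python) =====
-- from collections.abc import Iterable, Mapping
-- from typing import Any, Sequence
--
-- def _ordered_totals_map(totals: Mapping[str, Any]) -> dict[str, Any]:
--     ordered: dict[str, Any] = {}
--     preferred = (
--         "tap",
--         "tap_front",
--         "tap_back",
--         "counterbore",
--         "counterbore_front",
--         "counterbore_back",
--         "drill",
--         "spot",
--         "jig_grind",
--     )
--     for key in preferred:
--         if key in totals:
--             ordered[key] = totals[key]
--     for key in sorted(totals.keys()):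
--         if key not in ordered:
--             ordered[key] = totals[key]
--     return ordered
-- ===== SOURCE B (Python) =====
-- from collections.abc import Mapping
-- from typing import Any
--
-- def _ordered_totals_map(totals: Mapping[str, Any]) -> dict[str, Any]:
--     preferred = (
--         "tap",
--         "tap_front",
--         "tap_back",
--         "counterbore",
--         "counterbore_front",
--         "counterbore_back",
--         "drill",
--         "spot",
--         "jig_grind",
--     )
--     rank = {k: i for i, k in enumerate(preferred)}
--     return {k: totals[k] for k in sorted(totals, key=lambda k: (rank.get(k, len(preferred)), k))}
-- ===== Notes on version B (the rewrite author's own statement) =====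
-- stated objective: simpler
-- what changed: A builds the result with two sequential insertion loops (preferred keys first, then a skip-if-present pass over the alphabetically sorted keys); B precomputes a rank table from the preferred tuple and produces the whole result in one comprehension over a single sort with the composite key (rank.get(k, len(preferred)), k).
import Mathlib
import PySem

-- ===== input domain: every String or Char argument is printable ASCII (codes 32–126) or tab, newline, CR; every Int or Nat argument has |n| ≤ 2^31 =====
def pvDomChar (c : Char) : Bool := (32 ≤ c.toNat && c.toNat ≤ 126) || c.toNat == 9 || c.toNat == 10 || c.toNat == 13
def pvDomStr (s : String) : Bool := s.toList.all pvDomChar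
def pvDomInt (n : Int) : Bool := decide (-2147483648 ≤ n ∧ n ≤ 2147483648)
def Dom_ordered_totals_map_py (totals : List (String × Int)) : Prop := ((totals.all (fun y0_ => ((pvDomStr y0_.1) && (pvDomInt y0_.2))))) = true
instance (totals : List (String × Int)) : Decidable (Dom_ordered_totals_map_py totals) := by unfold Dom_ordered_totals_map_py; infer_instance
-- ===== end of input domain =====

-- B replaces A's two insertion loops by one sort with a composite (rank, key) sort key built
-- from a precomputed rank table — same ordering, a single pass (objective: simpler).

-- the 'preferred' tuple, identical literal in both Python sources
def pvPreferred : List String :=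
  ["tap", "tap_front", "tap_back", "counterbore", "counterbore_front",
   "counterbore_back", "drill", "spot", "jig_grind"]

-- ===== PORT A =====
-- totals is a Python dict: modelled as PySem.Dict.ofList of the association list.
-- totals[key] is ported as getD (every looked-up key is present, so the default is never used).
def ordered_totals_map_py (totals : List (String × Int)) : List (String × Int) :=
  let d := PySem.Dict.ofList totals
  -- ordered = {}; for key in preferred: if key in totals: ordered[key] = totals[key]
  let ordered1 := pvPreferred.foldl
    (fun o key => if d.contains key then o.insert key (d.getD key 0) else o)
    PySem.Dict.empty
  -- for key in sorted(totals.keys()): if key not in ordered: ordered[key] = totals[key]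
  let ordered2 := (PySem.List.sorted d.keys (fun k => k) false).foldl
    (fun o key => if !o.contains key then o.insert key (d.getD key 0) else o)
    ordered1
  ordered2.items

-- ===== PORT B =====
-- rank = {k: i for i, k in enumerate(preferred)}
def pvRankB : PySem.Dict String Int :=
  (PySem.List.enumerate pvPreferred).foldl (fun r p => r.insert p.2 p.1) PySem.Dict.empty

-- the composite sort key (rank.get(k, len(preferred)), k); Python tuple comparison is lexicographic
def pvSortKeyB (k : String) : Int ×ₗ String :=
  toLex (pvRankB.getD k (pvPreferred.length : Int), k)

-- {k: totals[k] for k in sorted(totals, key=lambda k: (rank.get(k, len(preferred)), k))}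
def ordered_totals_map_py_alt (totals : List (String × Int)) : List (String × Int) :=
  let d := PySem.Dict.ofList totals
  (PySem.List.sorted d.keys pvSortKeyB false).map (fun k => (k, d.getD k 0))

-- ===== PRECONDITION & SPEC =====
def Spec_ordered_totals_map_py (totals : List (String × Int)) (out : List (String × Int)) : Prop := out = ordered_totals_map_py_alt totals
instance (totals : List (String × Int)) (out : List (String × Int)) : Decidable (Spec_ordered_totals_map_py totals out) := by unfold Spec_ordered_totals_map_py; infer_instance

-- ===== CLAIM (what is proved, stated in full; the proofs are below) =====
def Claim_equal_ordered_totals_map_py : Prop := ∀ (totals : List (String × Int)), Dom_ordered_totals_map_py totals → Spec_ordered_totals_map_py totals (ordered_totals_map_py totals)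

-- ===== LEMMAS AND PROOFS =====

-- A's second loop ('if key not in ordered: ordered[key] = …') appends exactly the not-yet-present keys.
theorem pv_second_loop (f : String → Int) :
    ∀ (S : List String) (o : PySem.Dict String Int), S.Nodup →
    (S.foldl (fun o k => if !o.contains k then o.insert k (f k) else o) o).items
      = o.items ++ (S.filter (fun k => !o.contains k)).map (fun k => (k, f k)) := by
  intro S
  induction S with
  | nil => intro o _; simp
  | cons k S ih =>
    intro o hnd
    have hk_not : k ∉ S := (List.nodup_cons.mp hnd).1
    have hS : S.Nodup := (List.nodup_cons.mp hnd).2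
    by_cases hc : o.contains k = true
    · simp only [List.foldl_cons]
      rw [show (if (!o.contains k) = true then o.insert k (f k) else o) = o from by simp [hc]]
      rw [ih o hS]
      simp [hc]
    · have hc' : o.contains k = false := by simpa using hc
      simp only [List.foldl_cons]
      rw [show (if (!o.contains k) = true then o.insert k (f k) else o) = o.insert k (f k) from by
        simp [hc']]
      have hrec := ih (o.insert k (f k)) hS
      have hfil : S.filter (fun x => !(o.insert k (f k)).contains x)
          = S.filter (fun x => !o.contains x) := by
        apply List.filter_congr
        intro x hx
        have hxk : (x == k) = false := by
          simp only [beq_eq_false_iff_ne]; intro h; exact hk_not (h ▸ hx)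
        rw [PySem.Dict.contains_insert, hxk]
        simp
      rw [hrec, hfil, PySem.Dict.items_insert_of_not_contains o (f k) hc']
      simp [hc']

theorem ordered_totals_map_py_spec' (totals : List (String × Int)) :
    ordered_totals_map_py totals = ordered_totals_map_py_alt totals := by
  have hnd : (PySem.Dict.ofList totals).keys.Nodup := PySem.Dict.nodup_keys_ofList totals
  set d := PySem.Dict.ofList totals with hd
  set pair : String → String × Int := fun k => (k, d.getD k 0) with hpair
  set P : List String := pvPreferred.filter (fun k => d.contains k) with hP
  set S : List String := PySem.List.sorted d.keys (fun k => k) false with hS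
  set Q : List String := S.filter (fun k => !decide (k ∈ pvPreferred)) with hQ
  have hprefnd : pvPreferred.Nodup := by decide
  have hPnd : P.Nodup := hprefnd.filter _
  have hSperm : S.Perm d.keys := PySem.List.sorted_perm _ _ _
  have hSnd : S.Nodup := hSperm.symm.nodup hnd
  -- A's first loop: items = P.map pair
  have h1 : (pvPreferred.foldl
      (fun o key => if d.contains key then o.insert key (d.getD key 0) else o)
      PySem.Dict.empty).items = P.map pair := by
    rw [PySem.List.foldl_if_eq_foldl_filter (fun key => d.contains key)
      (fun o key => o.insert key (d.getD key 0)) pvPreferred PySem.Dict.empty]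
    rw [PySem.Dict.items_foldl_insert_fresh P (fun a => a) (fun a => d.getD a 0)
      PySem.Dict.empty (by intro a _; simp) (by simpa using hPnd)]
    rw [show (PySem.Dict.empty : PySem.Dict String Int).items = [] from rfl]
    simp [hpair]
  set o1 := pvPreferred.foldl
      (fun o key => if d.contains key then o.insert key (d.getD key 0) else o)
      PySem.Dict.empty with ho1
  have hkeys1 : o1.keys = P := by
    show o1.items.map (·.1) = P
    rw [h1]; simp [hpair, Function.comp_def]
  -- A's second loop appends Q.map pair
  have hfilQ : S.filter (fun k => !o1.contains k) = Q := by
    apply List.filter_congr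
    intro k hk
    have hkk : k ∈ d.keys := (hSperm.mem_iff).mp hk
    have hco1 : o1.contains k = decide (k ∈ P) := by
      rw [PySem.Dict.contains_eq_decide_mem_keys, hkeys1]
    rw [hco1, hP]
    simp [List.mem_filter, PySem.Dict.contains_eq_decide_mem_keys, hkk]
  have hA : ordered_totals_map_py totals = (P ++ Q).map pair := by
    show ((PySem.List.sorted d.keys (fun k => k) false).foldl
        (fun o key => if !o.contains key then o.insert key (d.getD key 0) else o) o1).items
      = (P ++ Q).map pair
    rw [← hS, pv_second_loop (fun k => d.getD k 0) S o1 hSnd, hfilQ, h1]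
    simp [hpair]
  -- B's sort produces exactly the key list P ++ Q
  have hrank_mem : ∀ a ∈ pvPreferred, pvRankB.getD a (pvPreferred.length : Int) < 9 := by decide
  have hrank_out : ∀ k, k ∉ pvPreferred → pvRankB.getD k (pvPreferred.length : Int) = 9 := by
    intro k hk
    have hkeys : pvRankB.keys = pvPreferred := by decide
    have hc : pvRankB.contains k = false := by
      rw [PySem.Dict.contains_eq_decide_mem_keys, hkeys]; simpa
    rw [PySem.Dict.getD_of_not_contains _ _ hc]; decide
  have hperm : (P ++ Q).Perm d.keys := by
    have h4 : P.Perm (d.keys.filter (fun k => decide (k ∈ pvPreferred))) := by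
      rw [List.perm_ext_iff_of_nodup hPnd (hnd.filter _)]
      intro a
      simp [hP, List.mem_filter, PySem.Dict.contains_eq_decide_mem_keys, and_comm]
    have h3 : Q.Perm (d.keys.filter (fun k => !decide (k ∈ pvPreferred))) :=
      hSperm.filter _
    exact (h4.append h3).trans (List.filter_append_perm _ _)
  have hpw : (P ++ Q).Pairwise (fun a b => pvSortKeyB a < pvSortKeyB b) := by
    rw [List.pairwise_append]
    refine ⟨?_, ?_, ?_⟩
    · exact List.Pairwise.sublist List.filter_sublist
        (by decide : pvPreferred.Pairwise (fun a b => pvSortKeyB a < pvSortKeyB b))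
    · have hle : S.Pairwise (fun a b : String => a ≤ b) :=
        PySem.List.sorted_pairwise d.keys (fun k => k)
      have hne : S.Pairwise (fun a b : String => a ≠ b) := hSnd
      have hlt : S.Pairwise (fun a b : String => a < b) :=
        (hle.and hne).imp (fun h => lt_of_le_of_ne h.1 h.2)
      have hQlt : Q.Pairwise (fun a b : String => a < b) :=
        List.Pairwise.sublist List.filter_sublist hlt
      refine List.Pairwise.imp_of_mem ?_ hQlt
      intro a b ha hb hab
      have ha' : a ∉ pvPreferred := by
        have := (List.mem_filter.mp ha).2; simpa using this
      have hb' : b ∉ pvPreferred := by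
        have := (List.mem_filter.mp hb).2; simpa using this
      show pvSortKeyB a < pvSortKeyB b
      unfold pvSortKeyB
      rw [Prod.Lex.toLex_lt_toLex]
      right
      exact ⟨by rw [hrank_out a ha', hrank_out b hb'], hab⟩
    · intro a ha b hb
      have ha' : a ∈ pvPreferred := List.mem_of_mem_filter ha
      have hb' : b ∉ pvPreferred := by
        have := (List.mem_filter.mp hb).2; simpa using this
      show pvSortKeyB a < pvSortKeyB b
      unfold pvSortKeyB
      rw [Prod.Lex.toLex_lt_toLex]
      left
      calc pvRankB.getD a (pvPreferred.length : Int) < 9 := hrank_mem a ha'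
        _ = pvRankB.getD b (pvPreferred.length : Int) := (hrank_out b hb').symm
  have hB : ordered_totals_map_py_alt totals = (P ++ Q).map pair := by
    show (PySem.List.sorted d.keys pvSortKeyB false).map pair = (P ++ Q).map pair
    rw [PySem.List.sorted_eq_of_perm_of_pairwise_lt d.keys (P ++ Q) pvSortKeyB hperm hpw]
  rw [hA, hB]

-- ===== VERDICT (by name: the statement is the Claim_ definition above) =====
theorem ordered_totals_map_py_spec : Claim_equal_ordered_totals_map_py := by
  intro totals _
  exact ordered_totals_map_py_spec' totals
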